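-- pv_equiv track=rewrite | github.com/stranskj/aares | aares/datafiles.py | longest_common
-- ===== SOURCE A (Python) =====
-- import itertools
--
-- def longest_common(list_strings, sep='_'):
--     """
--     Splits strings by `sep`, and return the common sections
--
--     :param str1:
--     :param str2:
--     :return:
--     """
--
--     strips = [string.split(sep) for string in list_strings]
--
--     unique = {key: '' for key in itertools.chain.from_iterable(strips)}
--
--     common = []
--
--     for key in unique.keys():
--         if all([key in strp for strp in strips]):
--             common.append(key)
--     return common
-- ===== SOURCE B (Python) =====
-- def longest_common(list_strings, sep='_'):
--     """
--     Splits strings by `sep`, and return the common sections.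
--     Builds the intersection of the token sets once, then makes a single
--     ordered, deduplicating pass over the first string's tokens.
--     """
--     if not list_strings:
--         return []
--     strips = [string.split(sep) for string in list_strings]
--     inter = set(strips[0])
--     for strp in strips[1:]:
--         inter = inter & set(strp)
--     common = []
--     seen = set()
--     for tok in strips[0]:
--         if tok in inter and tok not in seen:
--             common.append(tok)
--             seen.add(tok)
--     return common
-- ===== Notes on version B (the rewrite author's own statement) =====
-- stated objective: faster
-- what changed: Instead of scanning every split-list for every unique token (A's all(key in strp ...) over a dict of all tokens), B intersects the token sets once and then makes one ordered deduplicating pass over the first string's tokens only.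
import Mathlib
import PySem

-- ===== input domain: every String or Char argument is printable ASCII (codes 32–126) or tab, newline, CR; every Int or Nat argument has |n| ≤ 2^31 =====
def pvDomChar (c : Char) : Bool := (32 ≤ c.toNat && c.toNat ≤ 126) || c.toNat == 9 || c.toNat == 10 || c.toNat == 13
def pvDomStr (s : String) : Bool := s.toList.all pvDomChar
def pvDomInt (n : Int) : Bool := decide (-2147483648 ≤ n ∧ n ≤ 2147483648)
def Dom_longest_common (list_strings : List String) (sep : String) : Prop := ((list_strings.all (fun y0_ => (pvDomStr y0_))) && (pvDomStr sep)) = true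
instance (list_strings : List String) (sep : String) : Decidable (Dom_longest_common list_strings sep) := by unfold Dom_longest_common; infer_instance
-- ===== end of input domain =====

-- B replaces A's scan of every split-list for every unique token by one set-intersection
-- plus a single ordered deduplicating pass over the first string's tokens (faster).


-- ===== PORT A =====
def longest_common (list_strings : List String) (sep : String) : List String :=
  let strips := list_strings.map (fun string => (PySem.Str.split? string sep).getD [])
  -- {key: '' for key in itertools.chain.from_iterable(strips)}: its keys are the
  -- ordered dedup of the concatenation (PySem.List.dedup)
  let unique := PySem.List.dedup (strips.flatMap id)
  unique.foldl (fun common key =>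
    if strips.all (fun strp => strp.contains key) then common ++ [key] else common) []

-- ===== PORT B =====
def longest_common_alt (list_strings : List String) (sep : String) : List String :=
  match list_strings with
  | [] => []
  | s0 :: rest =>
    let strip0 := (PySem.Str.split? s0 sep).getD []
    let inter := rest.foldl
      (fun acc s => PySem.Set.inter acc (PySem.Set.ofList ((PySem.Str.split? s sep).getD [])))
      (PySem.Set.ofList strip0)
    (strip0.foldl (fun st tok =>
        if List.contains inter tok && !(List.contains st.2 tok) then
          (st.1 ++ [tok], PySem.Set.add st.2 tok)
        else st)
      (([] : List String), (PySem.Set.empty : PySem.Set String))).1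

-- ===== PRECONDITION & SPEC =====
-- Python's str.split('') raises ValueError: excluded whenever a split actually happens.
def Pre_longest_common (list_strings : List String) (sep : String) : Prop :=
  sep ≠ "" ∨ list_strings = []
instance (list_strings : List String) (sep : String) : Decidable (Pre_longest_common list_strings sep) := by unfold Pre_longest_common; infer_instance
def pvWitness_longest_common : List String × String := (["a_b_c", "c_b", "b_c_d"], "_")

def Spec_longest_common (list_strings : List String) (sep : String) (out : List String) : Prop := out = longest_common_alt list_strings sep
instance (list_strings : List String) (sep : String) (out : List String) : Decidable (Spec_longest_common list_strings sep out) := by unfold Spec_longest_common; infer_instance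

-- ===== CLAIM (what is proved, stated in full; the proofs are below) =====
def Claim_equal_longest_common : Prop := ∀ (list_strings : List String) (sep : String), Dom_longest_common list_strings sep → Pre_longest_common list_strings sep → Spec_longest_common list_strings sep (longest_common list_strings sep)

-- ===== LEMMAS AND PROOFS =====

-- first-occurrence pass: tokens of xs satisfying q, first occurrences only, skipping `seen`
def pvFirstOcc (q : String → Bool) (seen : List String) : List String → List String
  | [] => []
  | t :: l => if q t && !(seen.contains t) then t :: pvFirstOcc q (seen ++ [t]) l
              else pvFirstOcc q seen l

theorem pvFirstOcc_congr_seen (q : String → Bool) :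
    ∀ (xs seen1 seen2 : List String),
      (∀ u, q u = true → (u ∈ seen1 ↔ u ∈ seen2)) →
      pvFirstOcc q seen1 xs = pvFirstOcc q seen2 xs := by
  intro xs
  induction xs with
  | nil => intro _ _ _; rfl
  | cons t l ih =>
    intro seen1 seen2 h
    by_cases hq : q t = true
    · have hc : seen1.contains t = seen2.contains t := by
        rw [Bool.eq_iff_iff, List.contains_iff_mem, List.contains_iff_mem]
        exact h t hq
      simp only [pvFirstOcc, hq, hc]
      by_cases hc2 : seen2.contains t = true
      · simp only [hc2, Bool.not_true, Bool.and_false, if_neg (by simp : ¬(false = true))]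
        exact ih seen1 seen2 h
      · simp only [Bool.not_eq_true] at hc2
        simp only [hc2, Bool.not_false, Bool.and_true]
        have : pvFirstOcc q (seen1 ++ [t]) l = pvFirstOcc q (seen2 ++ [t]) l := by
          apply ih
          intro u hu
          simp [List.mem_append, h u hu]
        rw [this]
        simp
    · simp only [Bool.not_eq_true] at hq
      simp only [pvFirstOcc, hq, Bool.false_and, if_neg (by simp : ¬(false = true))]
      exact ih seen1 seen2 h

theorem pvFirstOcc_congr_q :
    ∀ (xs : List String) (q1 q2 : String → Bool) (seen : List String),
      (∀ t ∈ xs, q1 t = q2 t) → pvFirstOcc q1 seen xs = pvFirstOcc q2 seen xs := by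
  intro xs
  induction xs with
  | nil => intro _ _ _ _; rfl
  | cons t l ih =>
    intro q1 q2 seen h
    have ht : q1 t = q2 t := h t (by simp)
    have hl : ∀ u ∈ l, q1 u = q2 u := fun u hu => h u (by simp [hu])
    simp only [pvFirstOcc, ht]
    split_ifs with hcond
    · rw [ih q1 q2 (seen ++ [t]) hl]
    · exact ih q1 q2 seen hl

theorem pvFirstOcc_eq_nil (q : String → Bool) :
    ∀ (ys s : List String), (∀ k ∈ ys, q k = true → k ∈ s) → pvFirstOcc q s ys = [] := by
  intro ys
  induction ys with
  | nil => intro _ _; rfl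
  | cons t l ih =>
    intro s h
    by_cases hq : q t = true
    · have hc : s.contains t = true := List.contains_iff_mem.mpr (h t (by simp) hq)
      simp only [pvFirstOcc, hq, hc, Bool.not_true, Bool.and_false,
        if_neg (by simp : ¬(false = true))]
      exact ih s (fun k hk => h k (by simp [hk]))
    · simp only [Bool.not_eq_true] at hq
      simp only [pvFirstOcc, hq, Bool.false_and, if_neg (by simp : ¬(false = true))]
      exact ih s (fun k hk => h k (by simp [hk]))

-- A's dict-of-keys construction, filtered: filter of a Set.add-fold is filter of the seed
-- plus the first-occurrence pass over the added tokens
theorem pvFoldlAdd_filter (q : String → Bool) :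
    ∀ (xs s : List String),
      (xs.foldl PySem.Set.add s).filter q = s.filter q ++ pvFirstOcc q s xs := by
  intro xs
  induction xs with
  | nil => intro s; simp [pvFirstOcc]
  | cons t l ih =>
    intro s
    by_cases hc : List.contains s t = true
    · have hadd : PySem.Set.add s t = s := by
        have hmm : t ∈ s := by simpa using hc
        simp [PySem.Set.add, PySem.Set.contains, hmm]
      simp only [List.foldl_cons, hadd, pvFirstOcc, hc, Bool.not_true, Bool.and_false,
        if_neg (by simp : ¬(false = true))]
      exact ih s
    · have hcf : List.contains s t = false := Bool.eq_false_iff.mpr hc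
      have hadd : PySem.Set.add s t = s ++ [t] := by
        have hmm : t ∉ s := by simpa using hcf
        simp [PySem.Set.add, PySem.Set.contains, hmm]
      rw [List.foldl_cons, hadd, ih (s ++ [t])]
      by_cases hq : q t = true
      · simp only [pvFirstOcc, hq, hcf, Bool.not_false, Bool.and_true]
        simp [List.filter_append, hq]
      · simp only [Bool.not_eq_true] at hq
        simp only [pvFirstOcc, hq, Bool.false_and, if_neg (by simp : ¬(false = true))]
        have hseen : pvFirstOcc q (s ++ [t]) l = pvFirstOcc q s l := by
          apply pvFirstOcc_congr_seen
          intro u hu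
          simp only [List.mem_append, List.mem_singleton]
          constructor
          · rintro (h | rfl)
            · exact h
            · rw [hu] at hq; cases hq
          · intro h; exact Or.inl h
        rw [hseen]
        simp [List.filter_append, hq]

-- membership in B's running intersection
theorem pvInter_mem (f : String → List String) (rest : List String) :
    ∀ (acc : List String) (t : String),
      t ∈ rest.foldl (fun acc s => PySem.Set.inter acc (PySem.Set.ofList (f s))) acc ↔
        t ∈ acc ∧ ∀ s ∈ rest, t ∈ f s := by
  induction rest with
  | nil => intro acc t; simp
  | cons r rest ih =>
    intro acc t
    rw [List.foldl_cons, ih]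
    rw [PySem.Set.mem_inter, PySem.Set.mem_ofList]
    constructor
    · rintro ⟨⟨h1, h2⟩, h3⟩
      refine ⟨h1, ?_⟩
      intro s hs
      rcases List.mem_cons.mp hs with rfl | hs
      · exact h2
      · exact h3 s hs
    · rintro ⟨h1, h2⟩
      refine ⟨⟨h1, h2 r (by simp)⟩, ?_⟩
      intro s hs
      exact h2 s (by simp [hs])

-- B's emitting loop is the first-occurrence pass
theorem pvEmit (inter : List String) :
    ∀ (l out seen : List String),
      l.foldl (fun st tok =>
          if List.contains inter tok && !(List.contains st.2 tok) then
            (st.1 ++ [tok], PySem.Set.add st.2 tok)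
          else st) (out, seen)
      = (out ++ pvFirstOcc (fun t => List.contains inter t) seen l,
         seen ++ pvFirstOcc (fun t => List.contains inter t) seen l) := by
  intro l
  induction l with
  | nil => intro out seen; simp [pvFirstOcc]
  | cons t l ih =>
    intro out seen
    rw [List.foldl_cons]
    by_cases hcond : (List.contains inter t && !(List.contains seen t)) = true
    · have hseen : List.contains seen t = false := by
        cases hh : List.contains seen t
        · rfl
        · rw [hh] at hcond; simp at hcond
      have hadd : PySem.Set.add seen t = seen ++ [t] := by
        have hmm : t ∉ seen := by simpa using hseen
        simp [PySem.Set.add, PySem.Set.contains, hmm]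
      simp only [if_pos hcond, hadd]
      rw [ih (out ++ [t]) (seen ++ [t])]
      have hfo : pvFirstOcc (fun t => List.contains inter t) seen (t :: l)
          = t :: pvFirstOcc (fun t => List.contains inter t) (seen ++ [t]) l := by
        simp only [pvFirstOcc]
        rw [if_pos (by simpa using hcond)]
      rw [hfo]
      simp
    · simp only [if_neg hcond]
      rw [ih out seen]
      have hfo : pvFirstOcc (fun t => List.contains inter t) seen (t :: l)
          = pvFirstOcc (fun t => List.contains inter t) seen l := by
        simp only [pvFirstOcc]
        rw [if_neg (by simpa using hcond)]
      rw [hfo]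

-- the core equality, over an abstract splitting function f
theorem pvCore (f : String → List String) (s0 : String) (rest : List String) :
    (PySem.List.dedup (((s0 :: rest).map f).flatMap id)).foldl
      (fun common key =>
        if ((s0 :: rest).map f).all (fun strp => strp.contains key) then common ++ [key]
        else common) []
    = ((f s0).foldl (fun st tok =>
         if List.contains
              (rest.foldl (fun acc s => PySem.Set.inter acc (PySem.Set.ofList (f s)))
                (PySem.Set.ofList (f s0))) tok
            && !(List.contains st.2 tok) then
           (st.1 ++ [tok], PySem.Set.add st.2 tok)
         else st)
        (([] : List String), (PySem.Set.empty : PySem.Set String))).1 := by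
  set inter : List String :=
    rest.foldl (fun acc s => PySem.Set.inter acc (PySem.Set.ofList (f s)))
      (PySem.Set.ofList (f s0)) with hinter
  set P : String → Bool :=
    fun key => ((s0 :: rest).map f).all (fun strp => strp.contains key) with hP
  -- A's side
  have hA : (PySem.List.dedup (((s0 :: rest).map f).flatMap id)).foldl
      (fun common key => if P key then common ++ [key] else common) []
      = pvFirstOcc P [] (f s0) := by
    rw [PySem.List.foldl_append_if_eq_filter P, List.nil_append]
    have e1 : PySem.List.dedup (((s0 :: rest).map f).flatMap id)
        = ((rest.map f).flatMap id).foldl PySem.Set.add (PySem.Set.ofList (f s0)) := by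
      simp only [List.map_cons, List.flatMap_cons, id_eq]
      show PySem.Set.ofList (f s0 ++ (rest.map f).flatMap id) = _
      show (f s0 ++ (rest.map f).flatMap id).foldl PySem.Set.add [] = _
      rw [List.foldl_append]
      rfl
    rw [e1, pvFoldlAdd_filter]
    have e2 : pvFirstOcc P (PySem.Set.ofList (f s0)) ((rest.map f).flatMap id) = [] := by
      apply pvFirstOcc_eq_nil
      intro k _ hq
      rw [PySem.Set.mem_ofList]
      have := (List.all_eq_true.mp hq) (f s0) (by simp)
      exact List.contains_iff_mem.mp this
    rw [e2, List.append_nil]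
    have e3 : PySem.Set.ofList (f s0) = (f s0).foldl PySem.Set.add [] := rfl
    rw [e3, pvFoldlAdd_filter]
    simp
  -- B's side
  have hB : ((f s0).foldl (fun st tok =>
        if List.contains inter tok && !(List.contains st.2 tok) then
          (st.1 ++ [tok], PySem.Set.add st.2 tok)
        else st)
      (([] : List String), (PySem.Set.empty : PySem.Set String))).1
      = pvFirstOcc (fun t => List.contains inter t) [] (f s0) := by
    rw [pvEmit]
    simp [PySem.Set.empty]
  -- the two passes agree pointwise on the tokens of f s0
  have hpq : ∀ t ∈ f s0, P t = List.contains inter t := by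
    intro t ht
    have hR : List.contains inter t = true ↔ (t ∈ f s0 ∧ ∀ s ∈ rest, t ∈ f s) := by
      rw [List.contains_iff_mem, hinter, pvInter_mem, PySem.Set.mem_ofList]
    rw [Bool.eq_iff_iff, hR, hP]
    simp only [List.all_eq_true, List.map_cons, List.mem_cons, List.mem_map]
    constructor
    · intro h
      refine ⟨List.contains_iff_mem.mp (h (f s0) (Or.inl rfl)), ?_⟩
      intro s hs
      exact List.contains_iff_mem.mp (h (f s) (Or.inr ⟨s, hs, rfl⟩))
    · rintro ⟨h0, hrest⟩ strp hstrp
      rcases hstrp with rfl | ⟨s, hs, rfl⟩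
      · exact List.contains_iff_mem.mpr h0
      · exact List.contains_iff_mem.mpr (hrest s hs)
  rw [hA, hB]
  exact pvFirstOcc_congr_q (f s0) P (fun t => List.contains inter t) [] hpq

-- ===== VERDICT (by name: the statement is the Claim_ definition above) =====
theorem longest_common_spec : Claim_equal_longest_common := by
  intro list_strings sep _ _
  unfold Spec_longest_common
  cases list_strings with
  | nil =>
    rfl
  | cons s0 rest =>
    show longest_common (s0 :: rest) sep = longest_common_alt (s0 :: rest) sep
    unfold longest_common longest_common_alt
    exact pvCore (fun string => (PySem.Str.split? string sep).getD []) s0 rest
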